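-- pv_equiv track=rewrite | github.com/osh-finch/my-work | Hector Finch Analytics/src/Code Converter.py | assign_size
-- ===== SOURCE A (Python) =====
-- def assign_size(before_slash: str):
--     """Return (size_label, remaining_before_slash) or (None, original)."""
--     if not isinstance(before_slash, str):
--         return None, before_slash
--     suffix_size_mapping = {
--         "XS": "Extra Small",
--         "XL": "Extra Large",
--         "S": "Small",
--         "M": "Medium",
--         "L": "Large",
--         "LE": "Large",
--         "GT": "Giant",
--     }
--     for suf, lab in sorted(suffix_size_mapping.items(), key=lambda x: len(x[0]), reverse=True):
--         if before_slash.endswith(suf):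
--             return lab, before_slash[: -len(suf)].strip()
--     return None, before_slash
-- ===== SOURCE B (Python) =====
-- def assign_size(before_slash):
--     """Return (size_label, remaining_before_slash) or (None, original)."""
--     if not isinstance(before_slash, str):
--         return None, before_slash
--     rev = before_slash[::-1]
--     last = rev[:1]
--     prev = rev[1:2]
--     if last == "S":
--         if prev == "X":
--             return "Extra Small", before_slash[:-2].strip()
--         return "Small", before_slash[:-1].strip()
--     if last == "L":
--         if prev == "X":
--             return "Extra Large", before_slash[:-2].strip()
--         return "Large", before_slash[:-1].strip()
--     if last == "E" and prev == "L":
--         return "Large", before_slash[:-2].strip()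
--     if last == "T" and prev == "G":
--         return "Giant", before_slash[:-2].strip()
--     if last == "M":
--         return "Medium", before_slash[:-1].strip()
--     return None, before_slash
-- ===== Notes on version B (the rewrite author's own statement) =====
-- stated objective: simpler
-- what changed: Replaced A's sort of the suffix dict by key length plus a linear endswith scan with a character decision tree over the reversed string: reverse the input once and branch on its first one or two characters, so the table, the sort and the loop disappear.
import Mathlib
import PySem

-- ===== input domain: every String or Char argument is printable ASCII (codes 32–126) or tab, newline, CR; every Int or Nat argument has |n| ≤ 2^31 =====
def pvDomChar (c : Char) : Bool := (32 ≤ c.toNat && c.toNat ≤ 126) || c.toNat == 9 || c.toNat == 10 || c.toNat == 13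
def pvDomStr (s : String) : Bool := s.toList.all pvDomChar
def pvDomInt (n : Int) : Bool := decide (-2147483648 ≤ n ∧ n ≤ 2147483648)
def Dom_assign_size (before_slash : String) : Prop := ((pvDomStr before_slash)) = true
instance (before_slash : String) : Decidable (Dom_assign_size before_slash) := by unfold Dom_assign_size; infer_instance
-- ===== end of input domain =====

-- B replaces A's sort-plus-endswith scan by a character decision tree on the reversed string (last and second-to-last characters): simpler, no sort, no loop over a suffix table.


-- ===== PORT A =====
-- the dict literal of A, in insertion order
def pvSuffixMapping : PySem.Dict String String :=
  PySem.Dict.ofList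
    [("XS", "Extra Small"), ("XL", "Extra Large"), ("S", "Small"), ("M", "Medium"),
     ("L", "Large"), ("LE", "Large"), ("GT", "Giant")]

-- A's 'for suf, lab in …' loop with its early return
def pvAssignLoop (before_slash : String) : List (String × String) → Option String × String
  | [] => (none, before_slash)
  | (suf, lab) :: rest =>
    if PySem.Str.endswith before_slash suf then
      (some lab, PySem.Str.strip (PySem.Str.slice before_slash none (some (-(PySem.Str.len suf)))))
    else pvAssignLoop before_slash rest

def assign_size (before_slash : String) : Option String × String :=
  pvAssignLoop before_slash
    (PySem.List.sorted pvSuffixMapping.items (fun x => PySem.Str.len x.1) true)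

-- ===== PORT B =====
-- before_slash[::-1], then decide on the first one/two characters of the reversal
def assign_size_alt (before_slash : String) : Option String × String :=
  let rev := (PySem.Str.slice? before_slash none none (-1)).getD ""
  let last := PySem.Str.slice rev none (some 1)
  let prev := PySem.Str.slice rev (some 1) (some 2)
  if last == "S" then
    if prev == "X" then (some "Extra Small", PySem.Str.strip (PySem.Str.slice before_slash none (some (-2))))
    else (some "Small", PySem.Str.strip (PySem.Str.slice before_slash none (some (-1))))
  else if last == "L" then
    if prev == "X" then (some "Extra Large", PySem.Str.strip (PySem.Str.slice before_slash none (some (-2))))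
    else (some "Large", PySem.Str.strip (PySem.Str.slice before_slash none (some (-1))))
  else if last == "E" && prev == "L" then
    (some "Large", PySem.Str.strip (PySem.Str.slice before_slash none (some (-2))))
  else if last == "T" && prev == "G" then
    (some "Giant", PySem.Str.strip (PySem.Str.slice before_slash none (some (-2))))
  else if last == "M" then
    (some "Medium", PySem.Str.strip (PySem.Str.slice before_slash none (some (-1))))
  else (none, before_slash)

-- ===== PRECONDITION & SPEC =====
def Spec_assign_size (before_slash : String) (out : Option String × String) : Prop := out = assign_size_alt before_slash
instance (before_slash : String) (out : Option String × String) : Decidable (Spec_assign_size before_slash out) := by unfold Spec_assign_size; infer_instance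

-- ===== CLAIM (what is proved, stated in full; the proofs are below) =====
def Claim_equal_assign_size : Prop := ∀ (before_slash : String), Dom_assign_size before_slash → Spec_assign_size before_slash (assign_size before_slash)

-- ===== LEMMAS AND PROOFS =====

-- s.endswith(w) is 'the first len(w) characters of reversed s are reversed w'
theorem pv_endswith_eq_take_rev (s w : String) :
    PySem.Str.endswith s w
      = decide (s.toList.reverse.take w.toList.length = w.toList.reverse) := by
  rw [show PySem.Str.endswith s w = PySem.Chars.endswith s.toList w.toList from by simp [pysem],
    Bool.eq_iff_iff, PySem.Chars.endswith_iff, decide_eq_true_iff]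
  constructor
  · intro h
    have hp : w.toList.reverse <+: s.toList.reverse := List.reverse_prefix.mpr h
    have := List.prefix_iff_eq_take.mp hp
    simpa using this.symm
  · intro h
    have hp : w.toList.reverse <+: s.toList.reverse := by
      rw [List.prefix_iff_eq_take]
      simp [← h]
    exact List.reverse_prefix.mp hp

-- String == in terms of the character lists
theorem pv_beq_toList (x y : String) : (x == y) = decide (x.toList = y.toList) := by
  rw [Bool.eq_iff_iff, beq_iff_eq, decide_eq_true_iff]
  exact ⟨fun h => h ▸ rfl, fun h => String.toList_inj.mp h⟩

set_option maxHeartbeats 1600000 in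
theorem assign_size_spec : Claim_equal_assign_size := by
  intro s _
  show assign_size s = assign_size_alt s
  unfold assign_size assign_size_alt
  rw [show PySem.List.sorted pvSuffixMapping.items (fun x => PySem.Str.len x.1) true
      = [("XS", "Extra Small"), ("XL", "Extra Large"), ("LE", "Large"), ("GT", "Giant"),
         ("S", "Small"), ("M", "Medium"), ("L", "Large")] from by decide]
  simp only [pvAssignLoop]
  rw [show -(PySem.Str.len "XS") = (-2 : Int) from by decide,
      show -(PySem.Str.len "XL") = (-2 : Int) from by decide,
      show -(PySem.Str.len "LE") = (-2 : Int) from by decide,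
      show -(PySem.Str.len "GT") = (-2 : Int) from by decide,
      show -(PySem.Str.len "S") = (-1 : Int) from by decide,
      show -(PySem.Str.len "M") = (-1 : Int) from by decide,
      show -(PySem.Str.len "L") = (-1 : Int) from by decide,
      pv_endswith_eq_take_rev s "XS", pv_endswith_eq_take_rev s "XL",
      pv_endswith_eq_take_rev s "LE", pv_endswith_eq_take_rev s "GT",
      pv_endswith_eq_take_rev s "S", pv_endswith_eq_take_rev s "M",
      pv_endswith_eq_take_rev s "L"]
  simp only [PySem.Str.slice?_none_none_neg_one, Option.getD_some, pv_beq_toList]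
  rcases h : s.toList.reverse with _ | ⟨a, _ | ⟨b, t⟩⟩ <;>
    simp only [pysem] <;>
    split_ifs <;> simp_all [PySem.List.slice]
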